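-- pv_equiv track=rewrite | github.com/pypi-data/pypi-mirror-400 | packages/fetchgraph/fetchgraph-0.2.0.tar.gz/fetchgraph-0.2.0/src/fetchgraph/parsing/extract_json.py | _unescape_ws_outside_strings
-- ===== SOURCE A (Python) =====
-- def _unescape_ws_outside_strings(text: str) -> str:
--     """
--     \n/\r/\t → реальные whitespace ТОЛЬКО вне строк.
--     """
--     out = []
--     in_str = False
--     esc = False
--     i, n = 0, len(text)
--     while i < n:
--         ch = text[i]
--         if in_str:
--             out.append(ch)
--             if esc:
--                 esc = False
--             else:
--                 if ch == '\\':
--                     esc = True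
--                 elif ch == '"':
--                     in_str = False
--             i += 1
--             continue
--
--         if ch == '"':
--             in_str = True
--             out.append(ch)
--             i += 1
--             continue
--
--         if ch == '\\' and i + 1 < n:
--             nxt = text[i + 1]
--             if nxt == 'n':
--                 out.append('\n')
--                 i += 2
--                 continue
--             if nxt == 't':
--                 out.append('\t')
--                 i += 2
--                 continue
--             if nxt == 'r':
--                 out.append('\r')
--                 i += 2
--                 continue
--
--         out.append(ch)
--         i += 1
--     return ''.join(out)
-- ===== SOURCE B (Python) =====
-- import re
--
-- _PAT = re.compile(r'"(?:\\.|[^"\\])*"?|\\([ntr])', re.DOTALL)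
-- _WS = {'n': '\n', 't': '\t', 'r': '\r'}
--
-- def _unescape_ws_outside_strings(text: str) -> str:
--     # String literals are consumed whole by the first alternative, so the
--     # escape alternative can only fire outside them.
--     return _PAT.sub(lambda m: m.group(0) if m.group(1) is None else _WS[m.group(1)], text)
-- ===== Notes on version B (the rewrite author's own statement) =====
-- stated objective: faster
-- what changed: Replaced the manual index loop with in_str/esc flags by a single compiled-regex re.sub scan whose first alternative consumes whole JSON string literals (with optional closing quote) verbatim and whose second alternative rewrites \n/\t/\r escapes outside strings. (same O(n) scan, but executed by the compiled regex engine instead of a per-character Python loop).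
import Mathlib
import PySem

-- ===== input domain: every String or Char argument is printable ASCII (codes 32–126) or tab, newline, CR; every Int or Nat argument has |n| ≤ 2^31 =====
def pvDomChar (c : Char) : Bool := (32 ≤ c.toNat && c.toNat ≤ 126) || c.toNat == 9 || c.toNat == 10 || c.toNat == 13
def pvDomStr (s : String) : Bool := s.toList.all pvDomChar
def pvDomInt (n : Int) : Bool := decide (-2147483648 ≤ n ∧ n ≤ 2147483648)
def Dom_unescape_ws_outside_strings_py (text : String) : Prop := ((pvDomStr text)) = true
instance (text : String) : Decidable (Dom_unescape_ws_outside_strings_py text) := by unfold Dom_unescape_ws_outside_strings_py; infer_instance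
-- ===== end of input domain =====

-- B replaces A's index/flag state machine by a single regex-style scan that
-- consumes whole JSON string literals at once (simpler, same O(n) cost).

-- ===== PORT A =====
-- A's while loop over i with flags in_str/esc, as recursion on the remaining chars.
def pvLoopA : List Char → Bool → Bool → List Char
  | [], _, _ => []
  | c :: rest, in_str, esc =>
    if in_str then
      c :: (if esc then pvLoopA rest true false
            else if c = '\\' then pvLoopA rest true true
            else if c = '"' then pvLoopA rest false false
            else pvLoopA rest true false)
    else if c = '"' then
      c :: pvLoopA rest true esc
    else
      match _h : rest with
      | nxt :: rest' =>
        if c = '\\' then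
          if nxt = 'n' then '\n' :: pvLoopA rest' in_str esc
          else if nxt = 't' then '\t' :: pvLoopA rest' in_str esc
          else if nxt = 'r' then '\r' :: pvLoopA rest' in_str esc
          else c :: pvLoopA rest in_str esc
        else c :: pvLoopA rest in_str esc
      | [] => c :: pvLoopA rest in_str esc
  termination_by l _ _ => l.length
  decreasing_by all_goals simp_all

def unescape_ws_outside_strings_py (text : String) : String :=
  String.ofList (pvLoopA text.toList false false)

-- ===== PORT B =====
-- The regex's first alternative: after an opening quote, greedily consume
-- (?:\\.|[^"\\])* and an optional closing quote; returns (consumed, remainder).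
def pvStrLit : List Char → (List Char × List Char)
  | [] => ([], [])
  | ['\\'] => ([], ['\\'])
  | '\\' :: c :: rest =>
    let p := pvStrLit rest
    ('\\' :: c :: p.1, p.2)
  | c :: rest =>
    if c = '"' then (['"'], rest)
    else
      let p := pvStrLit rest
      (c :: p.1, p.2)

theorem pvStrLit_len : ∀ l : List Char, (pvStrLit l).2.length ≤ l.length := by
  intro l
  induction l using pvStrLit.induct <;> simp_all [pvStrLit] <;> omega

-- The left-to-right scan of re.sub: string-literal branch copied verbatim,
-- \n/\t/\r branch replaced, unmatched characters copied.
def pvLoopB : List Char → List Char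
  | [] => []
  | '"' :: rest =>
    let p := pvStrLit rest
    '"' :: p.1 ++ pvLoopB p.2
  | '\\' :: c :: rest =>
    if c = 'n' then '\n' :: pvLoopB rest
    else if c = 't' then '\t' :: pvLoopB rest
    else if c = 'r' then '\r' :: pvLoopB rest
    else '\\' :: pvLoopB (c :: rest)
  | c :: rest => c :: pvLoopB rest
  termination_by l => l.length
  decreasing_by all_goals first
    | (simp; exact pvStrLit_len _)
    | simp

def unescape_ws_outside_strings_py_alt (text : String) : String :=
  String.ofList (pvLoopB text.toList)

-- ===== PRECONDITION & SPEC =====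
def Spec_unescape_ws_outside_strings_py (text : String) (out : String) : Prop := out = unescape_ws_outside_strings_py_alt text
instance (text : String) (out : String) : Decidable (Spec_unescape_ws_outside_strings_py text out) := by unfold Spec_unescape_ws_outside_strings_py; infer_instance

-- ===== CLAIM (what is proved, stated in full; the proofs are below) =====
def Claim_equal_unescape_ws_outside_strings_py : Prop := ∀ (text : String), Dom_unescape_ws_outside_strings_py text → Spec_unescape_ws_outside_strings_py text (unescape_ws_outside_strings_py text)

-- ===== LEMMAS AND PROOFS =====

-- Joint invariant: outside a string A's loop equals B's scan; inside a string
-- (esc clear) A's loop equals the string-literal consumption followed by B.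
theorem pvLoop_aux : ∀ (n : Nat) (l : List Char), l.length ≤ n →
    (pvLoopA l false false = pvLoopB l ∧
     pvLoopA l true false = (pvStrLit l).1 ++ pvLoopB (pvStrLit l).2) := by
  intro n
  induction n with
  | zero =>
    intro l hl
    have hnil : l = [] := by cases l <;> simp_all
    subst hnil
    simp [pvLoopA, pvLoopB, pvStrLit]
  | succ n ih =>
    intro l hl
    match l with
    | [] => simp [pvLoopA, pvLoopB, pvStrLit]
    | [c] =>
      by_cases hq : c = '"'
      · subst hq; simp [pvLoopA, pvLoopB, pvStrLit]
      · by_cases hb : c = '\\'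
        · subst hb; simp [pvLoopA, pvLoopB, pvStrLit]
        · simp [pvLoopA, pvLoopB, pvStrLit, hq, hb]
    | c :: d :: rest =>
      have h1 : (d :: rest).length ≤ n := by simpa using hl
      have h2 : rest.length ≤ n := by simp at hl; omega
      obtain ⟨ihP1, ihQ1⟩ := ih (d :: rest) h1
      obtain ⟨ihP2, ihQ2⟩ := ih rest h2
      by_cases hq : c = '"'
      · subst hq
        constructor
        · simp only [pvLoopA, pvLoopB]; simp [ihQ1]
        · simp [pvLoopA, pvStrLit, ihP1]
      · by_cases hb : c = '\\'
        · subst hb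
          constructor
          · by_cases hn' : d = 'n'
            · subst hn'; simp [pvLoopA, pvLoopB, ihP2]
            · by_cases ht : d = 't'
              · subst ht; simp [pvLoopA, pvLoopB, ihP2]
              · by_cases hr : d = 'r'
                · subst hr; simp [pvLoopA, pvLoopB, ihP2]
                · simp [pvLoopA, pvLoopB, hn', ht, hr, ihP1]
          · show pvLoopA ('\\' :: d :: rest) true false = _
            have step : pvLoopA ('\\' :: d :: rest) true false
                = '\\' :: d :: pvLoopA rest true false := by
              cases rest <;> simp [pvLoopA]
            simp [step, pvStrLit, ihQ2]
        · constructor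
          · simp [pvLoopA, pvLoopB, hq, hb, ihP1]
          · simp [pvLoopA, pvStrLit, hq, hb, ihQ1]

theorem unescape_ws_outside_strings_py_spec : Claim_equal_unescape_ws_outside_strings_py := by
  intro text _
  unfold Spec_unescape_ws_outside_strings_py unescape_ws_outside_strings_py unescape_ws_outside_strings_py_alt
  exact congrArg String.ofList (pvLoop_aux text.toList.length text.toList le_rfl).1
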